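-- pv_equiv track=rewrite | github.com/peawyoyoyin/adventofcode2025 | day2.py | split_range_by_length
-- ===== SOURCE A (Python) =====
-- from typing import List, Tuple
--
-- def split_range_by_length(rnge: Tuple[int, int]):
--   start, end = rnge
--   if len(str(start)) == len(str(end)):
--     yield (start, end)
--   else:
--     next_start = start
--     cur_len = len(str(start))
--     while cur_len < len(str(end)):
--       yield (next_start, int('9'*cur_len))
--       next_start = int('1'+'0'*cur_len)
--       cur_len += 1
--     yield (next_start, end)
-- ===== SOURCE B (Python) =====
-- def split_range_by_length(rnge):
--     start, end = rnge
--     if len(str(start)) >= len(str(end)):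
--         return [(start, end)]
--     top = 10 ** len(str(start)) - 1
--     return [(start, top)] + split_range_by_length((top + 1, end))
-- ===== Notes on version B (the rewrite author's own statement) =====
-- stated objective: simpler
-- what changed: B replaces A's while loop that threads a next_start accumulator and a cur_len counter and builds/parses '9'*k and '1'+'0'*k strings with a short self-recursion: it peels the lowest digit-length band [(start, 10**len(str(start))-1)] arithmetically and recurses on the shrunk range (top+1, end), with no counter, no accumulator threading and no string construction.
import Mathlib
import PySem

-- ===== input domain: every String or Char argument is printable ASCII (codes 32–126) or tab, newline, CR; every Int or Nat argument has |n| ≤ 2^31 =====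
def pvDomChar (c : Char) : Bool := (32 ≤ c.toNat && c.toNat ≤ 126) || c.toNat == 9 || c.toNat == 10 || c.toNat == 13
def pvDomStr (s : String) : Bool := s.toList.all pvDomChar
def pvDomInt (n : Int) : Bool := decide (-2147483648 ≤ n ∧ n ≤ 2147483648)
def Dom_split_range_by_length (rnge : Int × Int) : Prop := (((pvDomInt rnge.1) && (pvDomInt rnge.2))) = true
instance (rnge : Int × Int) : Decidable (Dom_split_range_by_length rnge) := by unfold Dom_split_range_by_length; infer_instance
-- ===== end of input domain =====

-- B replaces A's counter-and-accumulator while loop (which builds and parses '9…9'/'10…0'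
-- strings) with a short self-recursion that peels the lowest digit-length band arithmetically
-- and recurses on the shrunk range; same return value, objective: simpler.

-- ===== PORT A =====
-- the while loop: state (next_start, cur_len); int('9'*c) / int('1'+'0'*c) ported literally via
-- PySem.Int.ofStr? (in A cur_len ≥ 1, so the parse always succeeds and .getD 0 is never the default)
def splitLoopA (endv : Int) (endLen : Nat) (next_start : Int) (cur_len : Nat) : List (Int × Int) :=
  if cur_len < endLen then
    (next_start, (PySem.Int.ofStr? (String.ofList (List.replicate cur_len '9'))).getD 0)
      :: splitLoopA endv endLen
           ((PySem.Int.ofStr? (String.ofList ('1' :: List.replicate cur_len '0'))).getD 0)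
           (cur_len + 1)
  else
    [(next_start, endv)]
  termination_by endLen - cur_len

def split_range_by_length (rnge : Int × Int) : List (Int × Int) :=
  let start := rnge.1
  let endv := rnge.2
  if (PySem.Int.toStr start).length = (PySem.Int.toStr endv).length then
    [(start, endv)]
  else
    splitLoopA endv (PySem.Int.toStr endv).length start (PySem.Int.toStr start).length

-- ===== PORT B =====
-- len(str(10^k)) = k+1, needed for B's termination (the recursive call strictly grows len(str(start)))
lemma pvLenTopSucc (k : Nat) :
    (PySem.Int.toStr ((10 : Int) ^ k - 1 + 1)).length = k + 1 := by
  have h1 : (10 : Int) ^ k - 1 + 1 = ((10 ^ k : Nat) : Int) := by push_cast; ring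
  rw [h1]
  simp only [PySem.Int.toStr, PySem.Int.toChars]
  rw [if_neg (by exact not_lt.2 (Int.natCast_nonneg _)), Int.toNat_natCast]
  have hle : (Nat.toDigits 10 (10 ^ k)).length ≤ k + 1 :=
    (Nat.length_toDigits_le_iff (by norm_num) (Nat.succ_pos k)).2
      (Nat.pow_lt_pow_right (by norm_num) (Nat.lt_succ_self k))
  have hgt : ¬ (Nat.toDigits 10 (10 ^ k)).length ≤ k := by
    by_cases hk : 0 < k
    · rw [Nat.length_toDigits_le_iff (by norm_num) hk]; omega
    · interval_cases k; decide
  simp [String.length]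
  omega

def split_range_by_length_alt (rnge : Int × Int) : List (Int × Int) :=
  if (PySem.Int.toStr rnge.1).length ≥ (PySem.Int.toStr rnge.2).length then
    [(rnge.1, rnge.2)]
  else
    (rnge.1, 10 ^ (PySem.Int.toStr rnge.1).length - 1)
      :: split_range_by_length_alt (10 ^ (PySem.Int.toStr rnge.1).length - 1 + 1, rnge.2)
  termination_by (PySem.Int.toStr rnge.2).length - (PySem.Int.toStr rnge.1).length
  decreasing_by
    simp only [pvLenTopSucc]
    omega

-- ===== PRECONDITION & SPEC =====
def Spec_split_range_by_length (rnge : Int × Int) (out : List (Int × Int)) : Prop := out = split_range_by_length_alt rnge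
instance (rnge : Int × Int) (out : List (Int × Int)) : Decidable (Spec_split_range_by_length rnge out) := by unfold Spec_split_range_by_length; infer_instance

-- ===== CLAIM (what is proved, stated in full; the proofs are below) =====
def Claim_equal_split_range_by_length : Prop := ∀ (rnge : Int × Int), Dom_split_range_by_length rnge → Spec_split_range_by_length rnge (split_range_by_length rnge)

-- ===== LEMMAS AND PROOFS =====

-- int('9'*c) = 10^c - 1 for the lengths reachable under Dom
lemma pvNinesVal (c : Nat) (hc : c ≤ 10) :
    (PySem.Int.ofStr? (String.ofList (List.replicate c '9'))).getD 0 = (10 : Int) ^ c - 1 := by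
  interval_cases c <;> decide

-- int('1' + '0'*c) = 10^c for the lengths reachable under Dom
lemma pvOneZerosVal (c : Nat) (hc : c ≤ 10) :
    (PySem.Int.ofStr? (String.ofList ('1' :: List.replicate c '0'))).getD 0 = (10 : Int) ^ c := by
  interval_cases c <;> decide

-- |n| ≤ 2^31 → len(str(n)) ≤ 11  (10 digits plus a possible sign)
lemma pvLenToStrLe (n : Int) (h : -2147483648 ≤ n ∧ n ≤ 2147483648) :
    (PySem.Int.toStr n).length ≤ 11 := by
  have hd : ∀ m : Nat, m ≤ 2147483648 → (Nat.toDigits 10 m).length ≤ 10 := by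
    intro m hm
    exact (Nat.length_toDigits_le_iff (by omega) (by omega)).2 (by omega)
  simp only [PySem.Int.toStr, PySem.Int.toChars]
  split_ifs with hneg
  · have := hd n.natAbs (by omega)
    simp [String.length]
    omega
  · have := hd n.toNat (by omega)
    simp [String.length]
    omega

-- A's loop started at state (ns, c) with len(str(ns)) = c < b = len(str(e)) ≤ 11 equals B's
-- recursive peel started at (ns, e): both emit (ns, 10^c - 1) and continue from 10^c
lemma pvLoopAlt (e : Int) (b : Nat) (hb : b ≤ 11) (hbe : (PySem.Int.toStr e).length = b) :
    ∀ gap c ns, b - c = gap → c < b → (PySem.Int.toStr ns).length = c →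
      splitLoopA e b ns c = split_range_by_length_alt (ns, e) := by
  intro gap
  induction gap with
  | zero => intro c ns hg hcb; omega
  | succ g ih =>
    intro c ns hg hcb hns
    rw [splitLoopA, if_pos hcb, pvNinesVal c (by omega), pvOneZerosVal c (by omega)]
    rw [split_range_by_length_alt.eq_def]
    simp only [hns, hbe]
    rw [if_neg (by omega)]
    have htop : (10 : Int) ^ c - 1 + 1 = (10 : Int) ^ c := by ring
    by_cases hlast : c + 1 = b
    · -- last band: the loop exits next turn; B's recursion bottoms out (len grows to b)
      rw [splitLoopA, if_neg (by omega)]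
      rw [split_range_by_length_alt.eq_def]
      simp only [pvLenTopSucc, hbe]
      rw [if_pos (by omega), htop]
    · -- middle band: apply the induction hypothesis at the grown start 10^c
      rw [ih (c + 1) ((10 : Int) ^ c) (by omega) (by omega) (by rw [← htop]; exact pvLenTopSucc c)]
      rw [htop]

-- ===== VERDICT (by name: the statement is the Claim_ definition above) =====
theorem split_range_by_length_spec : Claim_equal_split_range_by_length := by
  intro rnge hdom
  simp only [Dom_split_range_by_length, pvDomInt, Bool.and_eq_true, decide_eq_true_eq] at hdom
  show split_range_by_length rnge = split_range_by_length_alt rnge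
  obtain ⟨s, e⟩ := rnge
  have hb : (PySem.Int.toStr e).length ≤ 11 := pvLenToStrLe e hdom.2
  unfold split_range_by_length
  simp only
  by_cases heq : (PySem.Int.toStr s).length = (PySem.Int.toStr e).length
  · rw [if_pos heq, split_range_by_length_alt]
    simp only [heq]
    rw [if_pos (le_refl _)]
  · rw [if_neg heq]
    by_cases hlt : (PySem.Int.toStr s).length < (PySem.Int.toStr e).length
    · exact pvLoopAlt e _ hb rfl _ _ s rfl hlt rfl
    · -- start has at least as many digits (negative start): A's loop body never runs
      rw [splitLoopA, if_neg hlt, split_range_by_length_alt]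
      simp only
      rw [if_pos (by omega)]
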